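-- pv_equiv track=rewrite | github.com/ErisedKT/MIT-6.00.1x | Final_Prob2.py | largest_odd_times
-- ===== SOURCE A (Python) =====
-- def largest_odd_times(L):
--     """ Assumes L is a non-empty list of ints
--         Returns the largest element of L that occurs an odd number
--         of times in L. If no such element exists, returns None """
--     clone = L[:]
--     max_num = max(clone)
--     max_times = clone.count(max_num)
--     while max_times % 2 == 0:
--         while clone.count(max_num) != 0:
--             clone.remove(max_num)
--         try:
--             max_num = max(clone)
--             max_times = clone.count(max_num)
--         except:
--             return None
--     return max_num
-- ===== SOURCE B (Python) =====
-- def largest_odd_times(L):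
--     """ Assumes L is a non-empty list of ints
--         Returns the largest element of L that occurs an odd number
--         of times in L. If no such element exists, returns None """
--     odds = [x for x in set(L) if L.count(x) % 2 == 1]
--     return max(odds, default=None)
-- ===== Notes on version B (the rewrite author's own statement) =====
-- stated objective: simpler
-- what changed: A repeatedly takes the maximum of a working copy and deletes all its occurrences until it finds one with an odd count; B filters the distinct values down to those with an odd count and returns their maximum in one step.
import Mathlib
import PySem

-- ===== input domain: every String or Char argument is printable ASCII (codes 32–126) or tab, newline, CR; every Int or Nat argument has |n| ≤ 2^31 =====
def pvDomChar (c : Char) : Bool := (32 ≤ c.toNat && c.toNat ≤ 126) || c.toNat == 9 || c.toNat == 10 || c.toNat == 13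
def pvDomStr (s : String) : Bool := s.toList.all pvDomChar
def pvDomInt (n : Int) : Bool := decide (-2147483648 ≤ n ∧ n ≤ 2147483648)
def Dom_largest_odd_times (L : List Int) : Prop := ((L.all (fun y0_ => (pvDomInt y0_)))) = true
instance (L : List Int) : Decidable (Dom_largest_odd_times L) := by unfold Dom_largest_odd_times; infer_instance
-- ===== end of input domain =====

-- B replaces A's repeated delete-the-maximum loop by a single filter of the odd-count
-- values followed by one max (objective: simpler).

-- ===== PORT A =====
-- A's outer while: take the max; if its count is even, remove every occurrence
-- (the inner 'while clone.count(max_num) != 0: clone.remove(max_num)' removes all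
-- occurrences of max_num, i.e. filters them out) and retry; 'except: return None'
-- is max? = none on the emptied clone. Termination: removing the max shrinks the list.
def largest_odd_times_go (clone : List Int) : Option Int :=
  match h : PySem.List.max? clone (fun y => y) with
  | none => none
  | some m =>
    if (PySem.List.count clone m) % 2 == 0 then
      largest_odd_times_go (clone.filter (fun x => x ≠ m))
    else
      some m
termination_by clone.length
decreasing_by
  have hm : m ∈ clone := PySem.List.max?_mem h
  simp only [List.length_unattach]
  rw [show clone.length = clone.attach.length from (List.length_attach (l := clone)).symm]
  apply List.length_filter_lt_length_iff_exists.mpr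
  exact ⟨⟨m, hm⟩, List.mem_attach _ _, by simp⟩

def largest_odd_times (L : List Int) : Option Int :=
  largest_odd_times_go (L.take L.length)   -- clone = L[:]

-- ===== PORT B =====
def largest_odd_times_alt (L : List Int) : Option Int :=
  let odds := (PySem.Set.ofList L).filter (fun x => PySem.List.count L x % 2 == 1)
  PySem.List.max? odds (fun y => y)

-- ===== PRECONDITION & SPEC =====
-- Pre_ excludes only the empty list, on which A's initial 'max(clone)' raises ValueError.
def Pre_largest_odd_times (L : List Int) : Prop := L ≠ []
instance (L : List Int) : Decidable (Pre_largest_odd_times L) := by unfold Pre_largest_odd_times; infer_instance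
def pvWitness_largest_odd_times : List Int := [3, 1, 3, 2, 2]

def Spec_largest_odd_times (L : List Int) (out : Option Int) : Prop := out = largest_odd_times_alt L
instance (L : List Int) (out : Option Int) : Decidable (Spec_largest_odd_times L out) := by unfold Spec_largest_odd_times; infer_instance

-- ===== CLAIM (what is proved, stated in full; the proofs are below) =====
def Claim_equal_largest_odd_times : Prop := ∀ (L : List Int), Dom_largest_odd_times L → Pre_largest_odd_times L → Spec_largest_odd_times L (largest_odd_times L)

-- ===== LEMMAS AND PROOFS =====

-- max? (with the identity key) over Int depends only on the set of members.
theorem max?_id_eq_of_mem_iff (xs ys : List Int) (h : ∀ x, x ∈ xs ↔ x ∈ ys) :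
    PySem.List.max? xs (fun y => y) = PySem.List.max? ys (fun y => y) := by
  cases hx : PySem.List.max? xs (fun y => y) with
  | none =>
    rw [PySem.List.max?_eq_none_iff] at hx
    cases hy : PySem.List.max? ys (fun y => y) with
    | none => rfl
    | some b =>
      have hb : b ∈ ys := PySem.List.max?_mem hy
      rw [← h] at hb
      simp [hx] at hb
  | some a =>
    cases hy : PySem.List.max? ys (fun y => y) with
    | none =>
      rw [PySem.List.max?_eq_none_iff] at hy
      have ha : a ∈ xs := PySem.List.max?_mem hx
      rw [h] at ha
      simp [hy] at ha
    | some b =>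
      have hab : a ≤ b := PySem.List.max?_isMax hy a ((h a).mp (PySem.List.max?_mem hx))
      have hba : b ≤ a := PySem.List.max?_isMax hx b ((h b).mpr (PySem.List.max?_mem hy))
      simp [le_antisymm hab hba]

-- A's loop computes the max of the odd-count elements of the current clone.
theorem go_eq_max_of_odd (clone : List Int) :
    largest_odd_times_go clone
      = PySem.List.max? (clone.filter (fun x => clone.count x % 2 == 1)) (fun y => y) := by
  induction clone using (fun motive ih c => (measure List.length).wf.induction
      (C := motive) c ih) with
  | _ clone ih =>
  rw [largest_odd_times_go.eq_def]
  split
  next hmx =>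
    rw [PySem.List.max?_eq_none_iff] at hmx
    subst hmx
    rfl
  next m hmx =>
    have hm : m ∈ clone := PySem.List.max?_mem hmx
    by_cases hev : PySem.List.count clone m % 2 = 0
    · have hlen : (clone.filter (fun x => x ≠ m)).length < clone.length :=
        List.length_filter_lt_length_iff_exists.mpr ⟨m, hm, by simp⟩
      simp only [hev]
      rw [if_pos (by decide), ih _ hlen, List.filter_filter]
      -- the filtered clone has the same odd-count elements as clone
      refine congrArg (fun l => PySem.List.max? l (fun y => y)) (List.filter_congr ?_)
      intro x hx
      by_cases hxm : x = m
      · subst hxm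
        have h0 : List.count x clone % 2 = 0 := by simpa [PySem.List.count] using hev
        simp [h0]
      · simp [hxm]
    · have hev' : ¬ (PySem.List.count clone m % 2 == 0) = true := by simpa using hev
      simp only [hev']
      simp only [Bool.false_eq_true, if_false]
      have hmax : ∀ y ∈ clone.filter (fun x => clone.count x % 2 == 1), y ≤ m := by
        intro y hy
        exact PySem.List.max?_isMax hmx y (List.mem_of_mem_filter hy)
      have hmem : m ∈ clone.filter (fun x => clone.count x % 2 == 1) := by
        rw [List.mem_filter]
        refine ⟨hm, ?_⟩
        simp [PySem.List.count] at hev ⊢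
        omega
      cases hfx : PySem.List.max? (clone.filter (fun x => clone.count x % 2 == 1)) (fun y => y) with
      | none =>
        rw [PySem.List.max?_eq_none_iff] at hfx
        simp [hfx] at hmem
      | some b =>
        have h1 : b ≤ m := hmax b (PySem.List.max?_mem hfx)
        have h2 : m ≤ b := PySem.List.max?_isMax hfx m hmem
        simp [le_antisymm h2 h1]

-- ===== VERDICT (by name: the statement is the Claim_ definition above) =====
theorem largest_odd_times_spec : Claim_equal_largest_odd_times := by
  intro L _ _
  show largest_odd_times L = largest_odd_times_alt L
  unfold largest_odd_times largest_odd_times_alt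
  rw [List.take_length, go_eq_max_of_odd]
  apply max?_id_eq_of_mem_iff
  intro x
  simp only [List.mem_filter, PySem.Set.mem_ofList, PySem.List.count]
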